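-- pv_equiv track=rewrite | github.com/Arpitraj93/HackerRecon | endpoint_mapper.py | score_endpoint
-- ===== SOURCE A (Python) =====
-- def score_endpoint(endpoint):
--     ep = endpoint.lower()
--     score = 0
--
--     if "/api" in ep or "/rest" in ep:
--         score += 4
--
--     if "login" in ep or "auth" in ep:
--         score += 3
--
--     if "admin" in ep:
--         score += 4
--
--     if "?" in ep or "=" in ep:
--         score += 3
--
--     sensitive = ['user', 'account', 'order', 'cart', 'profile', 'password']
--     if any(s in ep for s in sensitive):
--         score += 2
--
--     return score
-- ===== SOURCE B (Python) =====
-- KEYWORDS = [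
--     ("/api", 0), ("/rest", 0),
--     ("login", 1), ("auth", 1),
--     ("admin", 2),
--     ("?", 3), ("=", 3),
--     ("user", 4), ("account", 4), ("order", 4), ("cart", 4), ("profile", 4), ("password", 4),
-- ]
-- POINTS = [4, 3, 4, 3, 2]
--
-- def score_endpoint(endpoint):
--     # Single left-to-right scan: at each position, mark the rule group of any
--     # keyword that starts there; then sum the points of the marked groups.
--     ep = endpoint.lower()
--     hit = [False] * 5
--     for i in range(len(ep)):
--         for kw, g in KEYWORDS:
--             if ep.startswith(kw, i):
--                 hit[g] = True
--     score = 0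
--     for h, p in zip(hit, POINTS):
--         if h:
--             score += p
--     return score
-- ===== Notes on version B (the rewrite author's own statement) =====
-- stated objective: alternative
-- what changed: Replaces five independent substring-membership tests with a single left-to-right position scan that pattern-matches all keywords at each index into a group hit-flag array, then sums the points of the hit groups.
import Mathlib
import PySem

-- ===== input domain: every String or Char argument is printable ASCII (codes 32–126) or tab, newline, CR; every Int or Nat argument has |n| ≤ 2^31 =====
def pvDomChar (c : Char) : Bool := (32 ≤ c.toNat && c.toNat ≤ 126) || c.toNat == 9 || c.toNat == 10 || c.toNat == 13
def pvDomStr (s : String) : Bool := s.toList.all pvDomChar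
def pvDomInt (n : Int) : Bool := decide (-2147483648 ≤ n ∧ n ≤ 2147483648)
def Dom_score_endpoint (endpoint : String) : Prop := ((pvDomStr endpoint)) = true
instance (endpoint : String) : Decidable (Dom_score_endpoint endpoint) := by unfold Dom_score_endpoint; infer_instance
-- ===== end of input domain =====

-- B replaces A's five substring-membership tests with one left-to-right position scan that
-- pattern-matches all keywords at each index into group hit-flags, then sums the hit groups' points.

-- ===== PORT A =====
def score_endpoint (endpoint : String) : Int :=
  let ep := PySem.Str.lower endpoint
  let score : Int := 0
  let score := if PySem.Str.isIn "/api" ep || PySem.Str.isIn "/rest" ep then score + 4 else score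
  let score := if PySem.Str.isIn "login" ep || PySem.Str.isIn "auth" ep then score + 3 else score
  let score := if PySem.Str.isIn "admin" ep then score + 4 else score
  let score := if PySem.Str.isIn "?" ep || PySem.Str.isIn "=" ep then score + 3 else score
  let sensitive := ["user", "account", "order", "cart", "profile", "password"]
  let score := if sensitive.any (fun s => PySem.Str.isIn s ep) then score + 2 else score
  score

-- ===== PORT B =====
def pvKeywords : List (String × Nat) :=
  [ ("/api", 0), ("/rest", 0),
    ("login", 1), ("auth", 1),
    ("admin", 2),
    ("?", 3), ("=", 3),
    ("user", 4), ("account", 4), ("order", 4), ("cart", 4), ("profile", 4), ("password", 4) ]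

def pvPoints : List Int := [4, 3, 4, 3, 2]

-- ep.startswith(kw, i) with 0 ≤ i ≤ len(ep) is exactly 'kw is a prefix of ep[i:]' (exact here).
def score_endpoint_alt (endpoint : String) : Int :=
  let l := (PySem.Str.lower endpoint).toList
  let hit := (PySem.List.pyRange 0 l.length 1).foldl
    (fun hit i => pvKeywords.foldl
      (fun hit kg =>
        if PySem.Chars.startswith (l.drop i.toNat) kg.1.toList then hit.set kg.2 true else hit)
      hit)
    (List.replicate 5 false)
  (hit.zip pvPoints).foldl (fun s hp => if hp.1 then s + hp.2 else s) 0

-- ===== PRECONDITION & SPEC =====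
def Spec_score_endpoint (endpoint : String) (out : Int) : Prop := out = score_endpoint_alt endpoint
instance (endpoint : String) (out : Int) : Decidable (Spec_score_endpoint endpoint out) := by unfold Spec_score_endpoint; infer_instance

-- ===== CLAIM =====
def Claim_equal_score_endpoint : Prop := ∀ (endpoint : String), Dom_score_endpoint endpoint → Spec_score_endpoint endpoint (score_endpoint endpoint)

-- ===== LEMMAS AND PROOFS =====

theorem pv_foldl_set_length (P : String → Bool) (ks : List (String × Nat)) (h : List Bool) :
    (ks.foldl (fun h kg => if P kg.1 then h.set kg.2 true else h) h).length = h.length := by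
  induction ks generalizing h with
  | nil => rfl
  | cons k ks ih =>
    simp only [List.foldl_cons]
    split
    · rw [ih, List.length_set]
    · exact ih h

theorem pv_foldl_set_getD (P : String → Bool) (ks : List (String × Nat)) (h : List Bool)
    (g' : Nat) (hlen : ∀ kg ∈ ks, kg.2 < h.length) :
    (ks.foldl (fun h kg => if P kg.1 then h.set kg.2 true else h) h).getD g' false
      = (h.getD g' false || ks.any (fun kg => kg.2 == g' && P kg.1)) := by
  induction ks generalizing h with
  | nil => simp
  | cons k ks ih =>
    simp only [List.foldl_cons, List.any_cons]
    have hk : k.2 < h.length := hlen k (by simp)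
    have htl : ∀ kg ∈ ks, kg.2 < h.length := fun kg hm => hlen kg (by simp [hm])
    by_cases hp : P k.1 = true
    · rw [if_pos hp, ih (h.set k.2 true)
        (by intro kg hm; rw [List.length_set]; exact htl kg hm)]
      by_cases hg : k.2 = g'
      · subst hg
        have hs : (h.set k.2 true).getD k.2 false = true := by
          simp [List.getD, hk]
        rw [hs]; simp [hp]
      · have hs : (h.set k.2 true).getD g' false = h.getD g' false := by
          simp [List.getD, List.getElem?_set_ne hg]
        have hb : (k.2 == g') = false := beq_eq_false_iff_ne.mpr hg
        rw [hs]; simp [hb]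
    · rw [if_neg hp, ih h htl]
      have hpf : P k.1 = false := by simpa using hp
      simp [hpf]

theorem pv_foldl_scan_getD (P : Int → String → Bool) (ks : List (String × Nat))
    (is : List Int) (h : List Bool) (g' : Nat) (hlen : ∀ kg ∈ ks, kg.2 < h.length) :
    (is.foldl (fun h i => ks.foldl
        (fun h kg => if P i kg.1 then h.set kg.2 true else h) h) h).getD g' false
      = (h.getD g' false || is.any (fun i => ks.any (fun kg => kg.2 == g' && P i kg.1))) := by
  induction is generalizing h with
  | nil => simp
  | cons i is ih =>
    simp only [List.foldl_cons, List.any_cons]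
    rw [ih _ (by intro kg hm; rw [pv_foldl_set_length]; exact hlen kg hm),
        pv_foldl_set_getD _ _ _ _ hlen, Bool.or_assoc]

theorem pv_any_startswith_eq_isIn (l : List Char) (kw : List Char) (hkw : kw ≠ []) :
    ((PySem.List.pyRange 0 l.length 1).any
        (fun i => PySem.Chars.startswith (l.drop i.toNat) kw))
      = PySem.Chars.isIn kw l := by
  rw [Bool.eq_iff_iff, List.any_eq_true, ← PySem.Chars.exists_prefix_drop_iff_isIn]
  constructor
  · rintro ⟨i, hi, hs⟩
    exact ⟨i.toNat, (PySem.Chars.startswith_iff _ _).1 hs⟩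
  · rintro ⟨j, hj⟩
    have hjlt : j < l.length := by
      by_contra hge
      have : l.drop j = [] := List.drop_eq_nil_of_le (by omega)
      rw [this] at hj
      exact hkw (List.prefix_nil.mp hj)
    refine ⟨(j : Int), ?_, (PySem.Chars.startswith_iff _ _).2 (by simpa using hj)⟩
    rw [PySem.List.mem_pyRange_one]
    constructor <;> [positivity; exact_mod_cast hjlt]

theorem pv_any_or (xs : List Int) (p q : Int → Bool) :
    (xs.any fun x => p x || q x) = (xs.any p || xs.any q) := by
  induction xs with
  | nil => simp
  | cons x xs ih =>
    simp only [List.any_cons, ih]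
    cases p x <;> cases q x <;> simp

theorem pv_list5 (h : List Bool) (h5 : h.length = 5) :
    h = [h.getD 0 false, h.getD 1 false, h.getD 2 false, h.getD 3 false, h.getD 4 false] := by
  match h, h5 with
  | [a, b, c, d, e], _ => rfl

theorem pv_scan_length (l : List Char) (is : List Int) (h : List Bool) :
    (is.foldl (fun hit i => pvKeywords.foldl
        (fun hit kg =>
          if PySem.Chars.startswith (l.drop i.toNat) kg.1.toList then hit.set kg.2 true else hit)
        hit) h).length = h.length := by
  induction is generalizing h with
  | nil => rfl
  | cons i is ih =>
    simp only [List.foldl_cons]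
    rw [ih]
    exact pv_foldl_set_length (fun kw => PySem.Chars.startswith (l.drop i.toNat) kw.toList)
      pvKeywords h

theorem pv_hit_getD (l : List Char) (g' : Nat) :
    ((PySem.List.pyRange 0 l.length 1).foldl
        (fun hit i => pvKeywords.foldl
          (fun hit kg =>
            if PySem.Chars.startswith (l.drop i.toNat) kg.1.toList then hit.set kg.2 true else hit)
          hit)
        (List.replicate 5 false)).getD g' false
      = (PySem.List.pyRange 0 l.length 1).any
          (fun i => pvKeywords.any
            (fun kg => kg.2 == g' && PySem.Chars.startswith (l.drop i.toNat) kg.1.toList)) := by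
  have h := pv_foldl_scan_getD
    (fun i kw => PySem.Chars.startswith (l.drop i.toNat) kw.toList) pvKeywords
    (PySem.List.pyRange 0 l.length 1) (List.replicate 5 false) g' (by decide)
  have h0 : (List.replicate 5 false).getD g' false = false := by
    match g' with
    | 0 | 1 | 2 | 3 | 4 => rfl
    | n + 5 => rfl
  rw [h0, Bool.false_or] at h
  exact h

-- ===== VERDICT =====
theorem score_endpoint_spec : Claim_equal_score_endpoint := by
  intro endpoint _
  unfold Spec_score_endpoint score_endpoint score_endpoint_alt
  dsimp only
  simp only [PySem.Str.isIn_eq, PySem.Str.toList_lower]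
  generalize PySem.Chars.lower endpoint.toList = l
  have h5 : ((PySem.List.pyRange 0 l.length 1).foldl
      (fun hit i => pvKeywords.foldl
        (fun hit kg =>
          if PySem.Chars.startswith (l.drop i.toNat) kg.1.toList then hit.set kg.2 true else hit)
        hit) (List.replicate 5 false)).length = 5 := by
    rw [pv_scan_length]; rfl
  rw [pv_list5 _ h5, pv_hit_getD, pv_hit_getD, pv_hit_getD, pv_hit_getD, pv_hit_getD]
  have e1 := pv_any_startswith_eq_isIn l "/api".toList (by decide)
  have e2 := pv_any_startswith_eq_isIn l "/rest".toList (by decide)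
  have e3 := pv_any_startswith_eq_isIn l "login".toList (by decide)
  have e4 := pv_any_startswith_eq_isIn l "auth".toList (by decide)
  have e5 := pv_any_startswith_eq_isIn l "admin".toList (by decide)
  have e6 := pv_any_startswith_eq_isIn l "?".toList (by decide)
  have e7 := pv_any_startswith_eq_isIn l "=".toList (by decide)
  have e8 := pv_any_startswith_eq_isIn l "user".toList (by decide)
  have e9 := pv_any_startswith_eq_isIn l "account".toList (by decide)
  have e10 := pv_any_startswith_eq_isIn l "order".toList (by decide)
  have e11 := pv_any_startswith_eq_isIn l "cart".toList (by decide)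
  have e12 := pv_any_startswith_eq_isIn l "profile".toList (by decide)
  have e13 := pv_any_startswith_eq_isIn l "password".toList (by decide)
  simp only [pvKeywords, pvPoints, List.any_cons, List.any_nil, Nat.reduceBEq, beq_self_eq_true,
    Bool.true_and, Bool.false_and, Bool.false_or, Bool.or_false, pv_any_or,
    e1, e2, e3, e4, e5, e6, e7, e8, e9, e10, e11, e12, e13, List.zip_cons_cons,
    List.zip_nil_right, List.foldl_cons, List.foldl_nil]
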